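-- pv_equiv track=rewrite | github.com/hieunq95/keras-rl | mcml-blockchain/q-learning.py | array_to_scalar
-- ===== SOURCE A (Python) =====
-- def array_to_scalar(arr, base1, base2):
--     """
--     Convert state array to scalar to feed q-table
--
--     :param a: input state array
--
--     :return: state scalar
--     """
--     base1 = base1
--     base2 = base2
--     scalar_state = 0
--     state_size = len(arr)
--     for i in range(state_size):
--         if i < state_size:
--             scalar_state += arr[i] * (base1 ** (state_size - 1 - i))
--         else:
--             scalar_state += arr[i] * (base2 ** (state_size - 1 - i))
--     return scalar_state
-- ===== SOURCE B (Python) =====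
-- def array_to_scalar(arr, base1, base2):
--     """Horner's method: one multiply-add per element (base2 is dead in A's loop)."""
--     scalar_state = 0
--     for x in arr:
--         scalar_state = scalar_state * base1 + x
--     return scalar_state
-- ===== Notes on version B (the rewrite author's own statement) =====
-- stated objective: faster
-- what changed: Replaced the per-index loop computing arr[i]*base1**(n-1-i) (a fresh O(n)-bit exponentiation each iteration; the base2 branch is dead since i < len(arr) always holds) with Horner's method, one multiply-add per element.
import Mathlib
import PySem

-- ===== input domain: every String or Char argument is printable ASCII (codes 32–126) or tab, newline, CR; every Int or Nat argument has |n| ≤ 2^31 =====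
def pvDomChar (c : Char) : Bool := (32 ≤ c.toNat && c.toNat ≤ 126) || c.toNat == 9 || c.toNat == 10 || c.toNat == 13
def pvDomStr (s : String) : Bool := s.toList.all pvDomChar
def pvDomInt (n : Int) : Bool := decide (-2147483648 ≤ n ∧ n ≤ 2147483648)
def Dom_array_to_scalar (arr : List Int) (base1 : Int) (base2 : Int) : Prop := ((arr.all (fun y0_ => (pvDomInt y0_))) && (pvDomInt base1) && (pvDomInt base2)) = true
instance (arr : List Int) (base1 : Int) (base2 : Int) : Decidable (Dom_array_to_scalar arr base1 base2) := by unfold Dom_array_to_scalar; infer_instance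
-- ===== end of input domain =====

-- B replaces A's per-index pow loop (whose base2 branch is dead) with Horner's method; measurably faster (asymptotically fewer multiplications).


-- ===== PORT A =====
-- literal transliteration: for i in range(state_size): if i < state_size: scalar += arr[i]*base1**(n-1-i) else: … base2 …
def array_to_scalar (arr : List Int) (base1 : Int) (base2 : Int) : Int :=
  let state_size : Int := arr.length
  (PySem.List.pyRange 0 state_size 1).foldl
    (fun scalar_state i =>
      if i < state_size then
        scalar_state + (PySem.List.pyGetD arr i 0) * base1 ^ (state_size - 1 - i).toNat
      else
        scalar_state + (PySem.List.pyGetD arr i 0) * base2 ^ (state_size - 1 - i).toNat)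
    0

-- ===== PORT B =====
-- Horner's method: one multiply-add per element
def array_to_scalar_alt (arr : List Int) (base1 : Int) (base2 : Int) : Int :=
  arr.foldl (fun scalar_state x => scalar_state * base1 + x) 0

-- ===== PRECONDITION & SPEC =====
def Spec_array_to_scalar (arr : List Int) (base1 : Int) (base2 : Int) (out : Int) : Prop := out = array_to_scalar_alt arr base1 base2
instance (arr : List Int) (base1 : Int) (base2 : Int) (out : Int) : Decidable (Spec_array_to_scalar arr base1 base2 out) := by unfold Spec_array_to_scalar; infer_instance

-- ===== CLAIM (what is proved, stated in full; the proofs are below) =====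
def Claim_equal_array_to_scalar : Prop := ∀ (arr : List Int) (base1 : Int) (base2 : Int), Dom_array_to_scalar arr base1 base2 → Spec_array_to_scalar arr base1 base2 (array_to_scalar arr base1 base2)

-- ===== LEMMAS AND PROOFS =====

-- Horner with an arbitrary accumulator shifts out as s * b^len
theorem horner_shift (t : List Int) (b s : Int) :
    t.foldl (fun acc x => acc * b + x) s
      = s * b ^ t.length + t.foldl (fun acc x => acc * b + x) 0 := by
  induction t generalizing s with
  | nil => simp
  | cons x t ih =>
    simp only [List.foldl_cons, List.length_cons]
    rw [ih (s * b + x), ih (0 * b + x)]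
    ring

theorem A_eq_sum (arr : List Int) (base1 base2 : Int) :
    array_to_scalar arr base1 base2
      = ((List.range arr.length).map
          (fun (k : Nat) => arr.getD k 0 * base1 ^ (arr.length - 1 - k))).sum := by
  unfold array_to_scalar
  dsimp only
  have hif : List.foldl
      (fun scalar_state i =>
        if i < (arr.length : Int) then scalar_state + PySem.List.pyGetD arr i 0 * base1 ^ ((arr.length : Int) - 1 - i).toNat
        else scalar_state + PySem.List.pyGetD arr i 0 * base2 ^ ((arr.length : Int) - 1 - i).toNat)
      0 (PySem.List.pyRange 0 (arr.length : Int) 1)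
      = List.foldl
      (fun scalar_state i => scalar_state + PySem.List.pyGetD arr i 0 * base1 ^ ((arr.length : Int) - 1 - i).toNat)
      0 (PySem.List.pyRange 0 (arr.length : Int) 1) := by
    apply PySem.List.foldl_congr_mem
    intro acc i hi
    rw [PySem.List.mem_pyRange_one] at hi
    simp only [if_pos hi.2]
  rw [hif]
  rw [PySem.List.foldl_add]
  rw [PySem.List.pyRange_one]
  simp only [List.map_map, Int.sub_zero, Int.toNat_natCast, zero_add]
  congr 1
  apply List.map_congr_left
  intro k hk
  simp only [Function.comp_apply, PySem.List.pyGetD_natCast]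
  congr 2
  omega

theorem sum_eq_horner (arr : List Int) (b : Int) :
    ((List.range arr.length).map
        (fun (k : Nat) => arr.getD k 0 * b ^ (arr.length - 1 - k))).sum
      = arr.foldl (fun scalar_state x => scalar_state * b + x) 0 := by
  induction arr with
  | nil => simp
  | cons x t ih =>
    simp only [List.length_cons, List.range_succ_eq_map, List.map_cons, List.map_map,
      List.sum_cons, List.getD_cons_zero, Nat.add_sub_cancel, Nat.sub_zero]
    have h : List.map ((fun (k : Nat) => (x :: t).getD k 0 * b ^ (t.length - k)) ∘ Nat.succ) (List.range t.length)
        = List.map (fun (k : Nat) => t.getD k 0 * b ^ (t.length - 1 - k)) (List.range t.length) := by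
      apply List.map_congr_left
      intro k hk
      simp only [Function.comp_apply, Nat.succ_eq_add_one, List.getD_cons_succ]
      congr 2
      omega
    rw [h, ih]
    rw [List.foldl_cons, horner_shift t b (0 * b + x)]
    ring

theorem array_to_scalar_spec : Claim_equal_array_to_scalar := by
  intro arr base1 base2 _
  unfold Spec_array_to_scalar array_to_scalar_alt
  rw [A_eq_sum arr base1 base2, sum_eq_horner]
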